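-- pv_equiv track=rewrite | github.com/AlexandruSchneider/algo_and_datastructures | graphen.py | makeAdjazenzMatrix
-- ===== SOURCE A (Python) =====
-- def makeAdjazenzMatrix(V, E):
--     # Resultat Liste (2 - dimensional)
--     resultAdjazenz = []
--     for knoten1 in V:
--         neuerKnoten = []
--         for knoten2 in V:
--             if (knoten1, knoten2) in E:
--                 neuerKnoten.append(1)
--             else:
--                 neuerKnoten.append(0)
--         resultAdjazenz.append(neuerKnoten)
--     return resultAdjazenz
-- ===== SOURCE B (Python) =====
-- def makeAdjazenzMatrix(V, E):
--     n = len(V)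
--     idx = {}
--     for k, v in enumerate(V):
--         idx[v] = idx.get(v, []) + [k]
--     matrix = [[0] * n for _ in range(n)]
--     for (a, b) in E:
--         for i in idx.get(a, []):
--             for j in idx.get(b, []):
--                 matrix[i][j] = 1
--     return matrix
-- ===== Notes on version B (the rewrite author's own statement) =====
-- stated objective: faster
-- what changed: Instead of testing every vertex pair against the edge list, B builds a dict mapping each vertex to its list of positions in V and scatters each edge once into a preallocated |V|x|V| zero matrix.
import Mathlib
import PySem

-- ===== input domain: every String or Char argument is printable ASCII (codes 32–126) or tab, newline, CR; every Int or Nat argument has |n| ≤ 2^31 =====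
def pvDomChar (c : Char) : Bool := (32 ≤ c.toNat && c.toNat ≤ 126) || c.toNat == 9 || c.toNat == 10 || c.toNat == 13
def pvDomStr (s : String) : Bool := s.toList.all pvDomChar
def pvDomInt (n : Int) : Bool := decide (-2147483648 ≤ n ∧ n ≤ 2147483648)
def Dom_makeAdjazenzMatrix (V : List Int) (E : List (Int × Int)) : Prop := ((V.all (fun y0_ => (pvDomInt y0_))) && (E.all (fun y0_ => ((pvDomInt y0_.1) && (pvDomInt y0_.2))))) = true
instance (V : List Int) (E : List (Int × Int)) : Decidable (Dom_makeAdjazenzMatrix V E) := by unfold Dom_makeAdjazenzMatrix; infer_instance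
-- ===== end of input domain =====

-- B replaces A's all-pairs scan with linear edge-list membership by a vertex→indices map plus an
-- edge scatter into a preallocated zero matrix (objective: faster).


-- ===== PORT A =====
def makeAdjazenzMatrix (V : List Int) (E : List (Int × Int)) : List (List Int) :=
  V.foldl (fun resultAdjazenz knoten1 =>
    resultAdjazenz ++ [V.foldl (fun neuerKnoten knoten2 =>
      neuerKnoten ++ [if (knoten1, knoten2) ∈ E then (1 : Int) else 0]) []]) []

-- ===== PORT B =====
-- idx[v] = idx.get(v, []) + [k]  over enumerate(V)
def pvAltIdx (V : List Int) : PySem.Dict Int (List Int) :=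
  (PySem.List.enumerate V 0).foldl
    (fun idx p => idx.modify p.2 [] (fun l => l ++ [p.1])) PySem.Dict.empty

def makeAdjazenzMatrix_alt (V : List Int) (E : List (Int × Int)) : List (List Int) :=
  let n := V.length
  let idx := pvAltIdx V
  let matrix := (List.range n).map (fun _ => List.replicate n (0 : Int))
  E.foldl (fun M e =>
    (idx.getD e.1 []).foldl (fun M i =>
      (idx.getD e.2 []).foldl (fun M j =>
        PySem.List.pySetD M i (PySem.List.pySetD (PySem.List.pyGetD M i []) j 1)) M) M) matrix

-- ===== PRECONDITION & SPEC =====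
def Spec_makeAdjazenzMatrix (V : List Int) (E : List (Int × Int)) (out : List (List Int)) : Prop := out = makeAdjazenzMatrix_alt V E
instance (V : List Int) (E : List (Int × Int)) (out : List (List Int)) : Decidable (Spec_makeAdjazenzMatrix V E out) := by unfold Spec_makeAdjazenzMatrix; infer_instance

-- ===== CLAIM (what is proved, stated in full; the proofs are below) =====
def Claim_equal_makeAdjazenzMatrix : Prop := ∀ (V : List Int) (E : List (Int × Int)), Dom_makeAdjazenzMatrix V E → Spec_makeAdjazenzMatrix V E (makeAdjazenzMatrix V E)

-- ===== LEMMAS AND PROOFS =====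

-- the common value of both programs, indexed by position
def pvMat (V : List Int) (P : List (Int × Int)) : List (List Int) :=
  (List.range V.length).map (fun i =>
    (List.range V.length).map (fun j => if (V[i]!, V[j]!) ∈ P then (1 : Int) else 0))

-- A equals pvMat
lemma pvA_eq (V : List Int) (E : List (Int × Int)) :
    makeAdjazenzMatrix V E = pvMat V E := by
  unfold makeAdjazenzMatrix pvMat
  rw [PySem.List.foldl_append_singleton_eq_map]
  apply List.ext_getElem
  · simp
  · intro i hi hi'
    simp only [List.getElem_map, List.getElem_range,
      PySem.List.foldl_append_singleton_eq_map]
    apply List.ext_getElem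
    · simp
    · intro j hj hj'
      simp only [List.nil_append, List.getElem_map, List.getElem_range]
      rw [getElem!_pos V i (by simpa using hi), getElem!_pos V j (by simpa using hj)]

-- characterisation of the index dictionary
lemma pvAltIdx_getD (V : List Int) (a : Int) :
    (pvAltIdx V).getD a [] =
      ((PySem.List.enumerate V 0).filter (fun p => p.2 == a)).map (·.1) := by
  have h := PySem.Dict.getD_foldl_modify_append
    ((PySem.List.enumerate V 0).map (fun q => (q.2, q.1)))
    (PySem.Dict.empty : PySem.Dict Int (List Int)) a
  rw [List.foldl_map] at h
  unfold pvAltIdx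
  simpa [List.filter_map, List.map_map, Function.comp_def] using h

lemma pvMem_altIdx (V : List Int) (a x : Int) :
    x ∈ (pvAltIdx V).getD a [] ↔ ∃ k : Nat, k < V.length ∧ V[k]! = a ∧ x = (k : Int) := by
  rw [pvAltIdx_getD]
  simp only [List.mem_map, List.mem_filter, PySem.List.mem_enumerate_iff]
  constructor
  · rintro ⟨p, ⟨⟨k, hk, rfl⟩, hpa⟩, rfl⟩
    refine ⟨k, hk, ?_, by simp⟩
    rw [getElem!_pos V k hk]
    simpa using hpa
  · rintro ⟨k, hk, ha, rfl⟩
    refine ⟨((0 : Int) + k, V[k]), ⟨⟨k, hk, rfl⟩, ?_⟩, by simp⟩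
    rw [getElem!_pos V k hk] at ha
    simpa using ha

lemma pvMem_altIdx_nat (V : List Int) (a : Int) (i : Nat) :
    (i : Int) ∈ (pvAltIdx V).getD a [] ↔ i < V.length ∧ V[i]! = a := by
  rw [pvMem_altIdx]
  constructor
  · rintro ⟨k, hk, ha, hik⟩
    have : i = k := by exact_mod_cast hik
    subst this; exact ⟨hk, ha⟩
  · rintro ⟨hk, ha⟩; exact ⟨i, hk, ha, rfl⟩

-- the row-level effect of B's inner loop: set the listed columns to 1
def pvRowFold (J : List Int) (r : List Int) : List Int :=
  J.foldl (fun r x => PySem.List.pySetD r x 1) r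

lemma pvRowFold_getElem? (J : List Int) (hJ : ∀ x ∈ J, 0 ≤ x) (r : List Int) (j : Nat) :
    (pvRowFold J r)[j]? =
      if ((j : Int) ∈ J ∧ j < r.length) then some 1 else r[j]? := by
  induction J generalizing r with
  | nil => simp [pvRowFold]
  | cons x rest ih =>
    have hx : 0 ≤ x := hJ x (by simp)
    have hrest : ∀ y ∈ rest, 0 ≤ y := fun y hy => hJ y (by simp [hy])
    show (pvRowFold rest (PySem.List.pySetD r x 1))[j]? = _
    rw [ih hrest, PySem.List.pySetD_of_nonneg _ _ hx]
    by_cases hlen : j < r.length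
    · by_cases hjx : (j : Int) = x
      · have hxj : x.toNat = j := by omega
        subst hxj
        by_cases hjr : ((x.toNat : Nat) : Int) ∈ rest <;>
          simp [hlen, hjx]
      · have hne : x.toNat ≠ j := by omega
        by_cases hjr : (j : Int) ∈ rest <;>
          simp [hlen, hjx, hjr, hne]
    · have h1 : ¬ ((j : Int) ∈ (x :: rest) ∧ j < r.length) := fun h => hlen h.2
      have h2 : ¬ ((j : Int) ∈ rest ∧ j < (r.set x.toNat 1).length) := by
        simp only [List.length_set]; exact fun h => hlen h.2
      have hjn : r[j]? = none := by rw [List.getElem?_eq_none_iff]; omega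
      rw [if_neg h1, if_neg h2, List.getElem?_set]
      split
      · rw [if_neg (by omega)]
        exact hjn.symm
      · rfl

lemma pvRowFold_length (J : List Int) (r : List Int) :
    (pvRowFold J r).length = r.length := by
  induction J generalizing r with
  | nil => rfl
  | cons x rest ih =>
    show (pvRowFold rest (PySem.List.pySetD r x 1)).length = _
    rw [ih, PySem.List.length_pySetD]

lemma pvRowFold_idem (J : List Int) (hJ : ∀ x ∈ J, 0 ≤ x) (r : List Int) :
    pvRowFold J (pvRowFold J r) = pvRowFold J r := by
  apply List.ext_getElem?
  intro j
  by_cases h : ((j : Int) ∈ J ∧ j < r.length)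
  · rw [pvRowFold_getElem? J hJ, pvRowFold_length, if_pos h,
      pvRowFold_getElem? J hJ, if_pos h]
  · rw [pvRowFold_getElem? J hJ, pvRowFold_length, if_neg h]

-- the matrix-level effect of B's inner loop at a fixed row index
def pvInner (J : List Int) (i : Int) (M : List (List Int)) : List (List Int) :=
  J.foldl (fun M j =>
    PySem.List.pySetD M i (PySem.List.pySetD (PySem.List.pyGetD M i []) j 1)) M

lemma pvInner_getElem? (J : List Int) (hJ : ∀ x ∈ J, 0 ≤ x) (m : Nat)
    (M : List (List Int)) (i : Nat) :
    (pvInner J (m : Int) M)[i]? =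
      if i = m then (M[i]?).map (pvRowFold J) else M[i]? := by
  induction J generalizing M with
  | nil =>
    show M[i]? = _
    split
    · cases h : M[i]? <;> simp [pvRowFold]
    · rfl
  | cons y rest ih =>
    have hy : 0 ≤ y := hJ y (by simp)
    have hrest : ∀ x ∈ rest, 0 ≤ x := fun x hx => hJ x (by simp [hx])
    show (pvInner rest (m : Int)
      (PySem.List.pySetD M (m : Int)
        (PySem.List.pySetD (PySem.List.pyGetD M (m : Int) []) y 1)))[i]? = _
    rw [ih hrest]
    rw [PySem.List.pySetD_of_nonneg _ _ (by positivity),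
        PySem.List.pySetD_of_nonneg _ _ hy,
        PySem.List.pyGetD_of_nonneg _ _ (by positivity)]
    simp only [Int.toNat_natCast]
    by_cases him : i = m
    · subst him
      by_cases hlen : i < M.length
      · have hget : M.getD i [] = M[i] := List.getD_eq_getElem M [] hlen
        have hM' : (M.set i ((M.getD i []).set y.toNat 1))[i]? =
            some ((M[i]).set y.toNat 1) := by
          simp [hlen]
        rw [if_pos rfl, if_pos rfl, hM', List.getElem?_eq_getElem hlen]
        simp only [Option.map_some]
        congr 1
        show pvRowFold rest (M[i].set y.toNat 1) = pvRowFold (y :: rest) M[i]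
        show pvRowFold rest (M[i].set y.toNat 1) = pvRowFold rest (PySem.List.pySetD M[i] y 1)
        rw [PySem.List.pySetD_of_nonneg _ _ hy]
      · have hset : M.set i ((M.getD i []).set y.toNat 1) = M :=
          List.set_eq_of_length_le (by omega)
        have hnone : M[i]? = none := by rw [List.getElem?_eq_none_iff]; omega
        rw [if_pos rfl, if_pos rfl, hset, hnone]; simp
    · rw [if_neg him, if_neg him, List.getElem?_set, if_neg (by omega)]

-- the matrix-level effect of B's double loop over one edge
lemma pvOuter_getElem? (I J : List Int) (hI : ∀ x ∈ I, 0 ≤ x) (hJ : ∀ x ∈ J, 0 ≤ x)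
    (M : List (List Int)) (i : Nat) :
    (I.foldl (fun M x => pvInner J x M) M)[i]? =
      if (i : Int) ∈ I then (M[i]?).map (pvRowFold J) else M[i]? := by
  induction I generalizing M with
  | nil => simp
  | cons x rest ih =>
    have hx : 0 ≤ x := hI x (by simp)
    have hrest : ∀ y ∈ rest, 0 ≤ y := fun y hy => hI y (by simp [hy])
    obtain ⟨m, rfl⟩ : ∃ m : Nat, x = (m : Int) := ⟨x.toNat, by omega⟩
    rw [List.foldl_cons, ih hrest, pvInner_getElem? J hJ]
    have hmem : ((i : Int) ∈ ((m : Int) :: rest)) ↔ (i = m ∨ (i : Int) ∈ rest) := by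
      simp [Nat.cast_inj]
    by_cases hir : (i : Int) ∈ rest
    · rw [if_pos hir, if_pos (hmem.2 (Or.inr hir))]
      by_cases him : i = m
      · rw [if_pos him]
        cases h : M[i]? <;> simp [pvRowFold_idem J hJ]
      · rw [if_neg him]
    · rw [if_neg hir]
      by_cases him : i = m
      · rw [if_pos him, if_pos (hmem.2 (Or.inl him))]
      · rw [if_neg him, if_neg (fun h => ((hmem.1 h).elim him hir))]

lemma pvMat_getElem? (V : List Int) (P : List (Int × Int)) (i : Nat) :
    (pvMat V P)[i]? = if i < V.length then
      some ((List.range V.length).map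
        (fun j => if (V[i]!, V[j]!) ∈ P then (1 : Int) else 0)) else none := by
  unfold pvMat
  by_cases h : i < V.length
  · rw [List.getElem?_eq_getElem (by simpa using h)]
    simp [h]
  · rw [if_neg h, List.getElem?_eq_none_iff.2 (by simpa using Nat.le_of_not_lt h)]

lemma pvRow_getElem? (V : List Int) (P : List (Int × Int)) (i j : Nat) :
    ((List.range V.length).map
        (fun j => if (V[i]!, V[j]!) ∈ P then (1 : Int) else 0))[j]? =
      if j < V.length then
        some (if (V[i]!, V[j]!) ∈ P then (1 : Int) else 0) else none := by
  by_cases h : j < V.length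
  · rw [List.getElem?_eq_getElem (by simpa using h)]
    simp [h]
  · rw [if_neg h, List.getElem?_eq_none_iff.2 (by simpa using Nat.le_of_not_lt h)]

-- one edge-scatter step advances pvMat by one edge
lemma pvStep (V : List Int) (P : List (Int × Int)) (a b : Int) :
    ((pvAltIdx V).getD a []).foldl (fun M i =>
        ((pvAltIdx V).getD b []).foldl (fun M j =>
          PySem.List.pySetD M i (PySem.List.pySetD (PySem.List.pyGetD M i []) j 1)) M)
      (pvMat V P) = pvMat V (P ++ [(a, b)]) := by
  have hI : ∀ x ∈ (pvAltIdx V).getD a [], 0 ≤ x := by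
    intro x hx; rcases (pvMem_altIdx V a x).1 hx with ⟨k, _, _, rfl⟩; positivity
  have hJ : ∀ x ∈ (pvAltIdx V).getD b [], 0 ≤ x := by
    intro x hx; rcases (pvMem_altIdx V b x).1 hx with ⟨k, _, _, rfl⟩; positivity
  show ((pvAltIdx V).getD a []).foldl
      (fun M x => pvInner ((pvAltIdx V).getD b []) x M) (pvMat V P) = _
  apply List.ext_getElem?
  intro i
  rw [pvOuter_getElem? _ _ hI hJ, pvMat_getElem?, pvMat_getElem?]
  by_cases hmemI : (i : Int) ∈ (pvAltIdx V).getD a []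
  · obtain ⟨hin, ha⟩ := (pvMem_altIdx_nat V a i).1 hmemI
    rw [if_pos hmemI, if_pos hin, if_pos hin]
    simp only [Option.map_some, Option.some.injEq]
    apply List.ext_getElem?
    intro j
    rw [pvRowFold_getElem? _ hJ, pvRow_getElem?, pvRow_getElem?]
    simp only [List.length_map, List.length_range]
    by_cases hjn : j < V.length
    · rw [if_pos hjn, if_pos hjn]
      by_cases hb : V[j]! = b
      · rw [if_pos ⟨(pvMem_altIdx_nat V b j).2 ⟨hjn, hb⟩, hjn⟩, if_pos (by simp [ha, hb])]
      · rw [if_neg (fun hc => hb ((pvMem_altIdx_nat V b j).1 hc.1).2)]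
        have hpair : (V[i]!, V[j]!) ≠ (a, b) := fun h => hb (congrArg Prod.snd h)
        have hiff : ((V[i]!, V[j]!) ∈ P ++ [(a, b)]) ↔ ((V[i]!, V[j]!) ∈ P) := by
          constructor
          · intro h
            rcases List.mem_append.1 h with h | h
            · exact h
            · exact absurd (List.mem_singleton.1 h) hpair
          · exact fun h => List.mem_append_left _ h
        simp only [hiff]
    · rw [if_neg (fun hc => hjn hc.2), if_neg hjn, if_neg hjn]
  · rw [if_neg hmemI]
    by_cases hin : i < V.length
    · rw [if_pos hin, if_pos hin]
      have ha : V[i]! ≠ a := fun h => hmemI ((pvMem_altIdx_nat V a i).2 ⟨hin, h⟩)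
      congr 1
      apply List.map_congr_left
      intro j _
      have hpair : (V[i]!, V[j]!) ≠ (a, b) := fun h => ha (congrArg Prod.fst h)
      have hiff : ((V[i]!, V[j]!) ∈ P ++ [(a, b)]) ↔ ((V[i]!, V[j]!) ∈ P) := by
        constructor
        · intro h
          rcases List.mem_append.1 h with h | h
          · exact h
          · exact absurd (List.mem_singleton.1 h) hpair
        · exact fun h => List.mem_append_left _ h
      simp only [hiff]
    · rw [if_neg hin, if_neg hin]

lemma pvFold (V : List Int) (E P : List (Int × Int)) :
    E.foldl (fun M e =>
      ((pvAltIdx V).getD e.1 []).foldl (fun M i =>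
        ((pvAltIdx V).getD e.2 []).foldl (fun M j =>
          PySem.List.pySetD M i (PySem.List.pySetD (PySem.List.pyGetD M i []) j 1)) M) M)
      (pvMat V P) = pvMat V (P ++ E) := by
  induction E generalizing P with
  | nil => simp
  | cons e rest ih =>
    obtain ⟨a, b⟩ := e
    rw [List.foldl_cons, pvStep V P a b, ih (P ++ [(a, b)])]
    simp

lemma pvAlt_eq (V : List Int) (E : List (Int × Int)) :
    makeAdjazenzMatrix_alt V E = pvMat V E := by
  have h0 : (List.range V.length).map (fun _ => List.replicate V.length (0 : Int))
      = pvMat V [] := by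
    unfold pvMat
    apply List.map_congr_left
    intro i _
    simp
  show E.foldl (fun M e =>
      ((pvAltIdx V).getD e.1 []).foldl (fun M i =>
        ((pvAltIdx V).getD e.2 []).foldl (fun M j =>
          PySem.List.pySetD M i (PySem.List.pySetD (PySem.List.pyGetD M i []) j 1)) M) M)
      ((List.range V.length).map (fun _ => List.replicate V.length (0 : Int))) = pvMat V E
  rw [h0]
  simpa using pvFold V E []

-- ===== VERDICT (by name: the statement is the Claim_ definition above) =====
theorem makeAdjazenzMatrix_spec : Claim_equal_makeAdjazenzMatrix := by
  intro V E _
  unfold Spec_makeAdjazenzMatrix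
  rw [pvA_eq, pvAlt_eq]
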